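-- pv_equiv track=rewrite | github.com/StpME/VCThemeGUI | src/test_class.py | get_backdrop_section
-- ===== SOURCE A (Python) =====
-- def get_backdrop_section(css_content):
--     dark_backdrops = set()
--     current_section = None
--     for line in css_content.split("\n"):
--         if ".theme-dark" in line:
--             current_section = "dark"
--         elif "--dplus-backdrop" in line:
--             if current_section == "dark":
--                 dark_backdrops.add(line)
--     return "Backdrop list:\n" + "\n".join(dark_backdrops)
-- ===== SOURCE B (Python) =====
-- def get_backdrop_section(css_content):
--     lines = css_content.split("\n")
--     # advance to the first line that opens the dark-theme section
--     k = 0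
--     while k < len(lines) and ".theme-dark" not in lines[k]:
--         k += 1
--     tail = lines[k:]
--     dark_backdrops = dict.fromkeys(
--         l for l in tail if "--dplus-backdrop" in l and ".theme-dark" not in l
--     )
--     return "Backdrop list:\n" + "\n".join(dark_backdrops)
-- ===== Notes on version B (the rewrite author's own statement) =====
-- stated objective: idiomatic
-- what changed: Replaces the stateful latch-loop (a mode flag mutated while scanning) by a boundary-find-then-filter decomposition: locate the first '.theme-dark' line, then build the result by a single filter + ordered dedup (dict.fromkeys) over the suffix; note A joins a hash-ordered set, B joins in first-occurrence order (outputs equal as line sets).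
import Mathlib
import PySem

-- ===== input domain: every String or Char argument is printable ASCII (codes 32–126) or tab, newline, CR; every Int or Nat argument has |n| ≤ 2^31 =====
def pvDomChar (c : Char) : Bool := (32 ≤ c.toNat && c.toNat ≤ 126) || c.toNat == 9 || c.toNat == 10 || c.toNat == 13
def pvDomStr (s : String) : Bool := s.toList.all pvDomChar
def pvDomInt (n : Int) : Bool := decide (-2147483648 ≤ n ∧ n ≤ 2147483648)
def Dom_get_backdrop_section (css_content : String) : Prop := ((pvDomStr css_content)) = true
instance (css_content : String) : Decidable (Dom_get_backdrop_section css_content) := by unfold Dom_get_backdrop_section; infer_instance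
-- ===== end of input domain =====

-- B replaces A's stateful latch-loop by locate-boundary-then-filter+dedup (idiomatic decomposition).
-- Both Pythons join a set of lines; Python's hash iteration order is not modelled: each port joins the
-- lines in first-insertion order, and outputs are compared as sets of lines (the task's ret_compare).

-- ===== PORT A =====
def pvAStep (st : PySem.Set String × Option String) (line : String) :
    PySem.Set String × Option String :=
  if PySem.Str.isIn ".theme-dark" line then (st.1, some "dark")
  else if PySem.Str.isIn "--dplus-backdrop" line then
    (if st.2 = some "dark" then (PySem.Set.add st.1 line, st.2) else st)
  else st

def get_backdrop_section (css_content : String) : String :=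
  let st := ((PySem.Str.split? css_content "\n").getD []).foldl pvAStep (PySem.Set.empty, none)
  "Backdrop list:\n" ++ PySem.Str.join "\n" st.1

-- ===== PORT B =====
def get_backdrop_section_alt (css_content : String) : String :=
  let lines := (PySem.Str.split? css_content "\n").getD []
  let tail := lines.dropWhile (fun l => !(PySem.Str.isIn ".theme-dark" l))
  let dark_backdrops := PySem.List.dedup
    (tail.filter (fun l => PySem.Str.isIn "--dplus-backdrop" l && !(PySem.Str.isIn ".theme-dark" l)))
  "Backdrop list:\n" ++ PySem.Str.join "\n" dark_backdrops

-- ===== PRECONDITION & SPEC =====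
def Spec_get_backdrop_section (css_content : String) (out : String) : Prop := out = get_backdrop_section_alt css_content
instance (css_content : String) (out : String) : Decidable (Spec_get_backdrop_section css_content out) := by unfold Spec_get_backdrop_section; infer_instance

-- ===== CLAIM (what is proved, stated in full; the proofs are below) =====
def Claim_equal_get_backdrop_section : Prop := ∀ (css_content : String), Dom_get_backdrop_section css_content → Spec_get_backdrop_section css_content (get_backdrop_section css_content)

-- ===== LEMMAS AND PROOFS =====

-- once the section is "dark" it stays "dark": A's set update is exactly the filtered add-fold
lemma pvFoldDark (t : List String) (s : PySem.Set String) :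
    (t.foldl pvAStep (s, some "dark")).1 =
      (t.filter (fun l => PySem.Str.isIn "--dplus-backdrop" l
          && !(PySem.Str.isIn ".theme-dark" l))).foldl PySem.Set.add s := by
  induction t generalizing s with
  | nil => rfl
  | cons h t ih =>
    by_cases hd : PySem.Str.isIn ".theme-dark" h
    · simp only [List.foldl_cons, List.filter_cons, pvAStep, hd, if_true,
        Bool.not_true, Bool.and_false, Bool.false_eq_true, if_false, ih]
    · by_cases hb : PySem.Str.isIn "--dplus-backdrop" h
      · simp only [List.foldl_cons, List.filter_cons, pvAStep, hd, hb,
          Bool.not_false, Bool.and_true, if_true, Bool.false_eq_true, if_false,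
          reduceCtorEq, ih]
      · simp only [List.foldl_cons, List.filter_cons, pvAStep, hd, hb,
          Bool.and_false, Bool.false_and, Bool.false_eq_true, if_false, ih]

-- before the first ".theme-dark" line A's state is unchanged; afterwards pvFoldDark applies
lemma pvFoldMain (ls : List String) (s : PySem.Set String) :
    (ls.foldl pvAStep (s, none)).1 =
      ((ls.dropWhile (fun l => !(PySem.Str.isIn ".theme-dark" l))).filter
        (fun l => PySem.Str.isIn "--dplus-backdrop" l
          && !(PySem.Str.isIn ".theme-dark" l))).foldl PySem.Set.add s := by
  induction ls generalizing s with
  | nil => rfl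
  | cons h t ih =>
    by_cases hd : PySem.Str.isIn ".theme-dark" h
    · simp only [List.foldl_cons, List.dropWhile_cons, pvAStep, hd, if_true,
        Bool.not_true, Bool.false_eq_true, if_false, List.filter_cons,
        Bool.and_false, pvFoldDark]
    · by_cases hb : PySem.Str.isIn "--dplus-backdrop" h
      · simp only [List.foldl_cons, List.dropWhile_cons, pvAStep, hd, hb, if_true,
          Bool.not_false, Bool.false_eq_true, if_false, reduceCtorEq, ih]
      · simp only [List.foldl_cons, List.dropWhile_cons, pvAStep, hd, hb,
          Bool.not_false, Bool.false_eq_true, if_false, if_true, ih]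

-- ===== VERDICT (by name: the statement is the Claim_ definition above) =====
theorem get_backdrop_section_spec : Claim_equal_get_backdrop_section := by
  intro css _
  unfold Spec_get_backdrop_section get_backdrop_section get_backdrop_section_alt
  simp only [PySem.List.dedup_eq_ofList, PySem.Set.ofList_eq_foldl, pvFoldMain]
  rfl
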